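-- pv_equiv track=rewrite | github.com/gopytsrs/aoc2024 | 2024-12-22_Day22/main.py | get_sell_prices
-- ===== SOURCE A (Python) =====
-- from collections import Counter, deque
--
-- def get_next_secret(secret):
--     next_secret = secret
--     next_secret ^= (next_secret * 64) % 16777216
--     next_secret ^= (next_secret // 32) % 16777216
--     next_secret ^= (next_secret * 2048) % 16777216
--     return next_secret
--
-- def get_sell_prices(secret, n):
--     sell_prices = {}
--     prev_secret = secret
--     changes = deque(maxlen=4)
--     for _ in range(n):
--         curr_secret = get_next_secret(prev_secret)
--         price_change = curr_secret % 10 - prev_secret % 10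
--         changes.append(price_change)
--         if len(changes) == 4:
--             sequence = tuple(changes)
--             if sequence not in sell_prices:
--                 sell_prices[sequence] = curr_secret % 10
--         prev_secret = curr_secret
--     return sell_prices
-- ===== SOURCE B (Python) =====
-- def get_next_secret(secret):
--     next_secret = secret
--     next_secret ^= (next_secret * 64) % 16777216
--     next_secret ^= (next_secret // 32) % 16777216
--     next_secret ^= (next_secret * 2048) % 16777216
--     return next_secret
--
-- def get_sell_prices(secret, n):
--     # Phase 1: build the full list of secrets, then prices and changes.
--     secrets = [secret]
--     s = secret
--     for _ in range(n):
--         s = get_next_secret(s)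
--         secrets.append(s)
--     prices = [x % 10 for x in secrets]
--     changes = [prices[i + 1] - prices[i] for i in range(n)]
--     # Phase 2: scan length-4 windows left to right; first occurrence wins.
--     sell_prices = {}
--     for i in range(n - 3):
--         key = (changes[i], changes[i + 1], changes[i + 2], changes[i + 3])
--         if key not in sell_prices:
--             sell_prices[key] = prices[i + 4]
--     return sell_prices
-- ===== Notes on version B (the rewrite author's own statement) =====
-- stated objective: alternative
-- what changed: Replaces A's single fused streaming loop (deque of last 4 changes, dict updated inside the secret-generation loop) with a two-phase decomposition: first build the full secrets/prices/changes arrays, then a separate left-to-right window scan over indices recording prices[i+4] for each unseen 4-change window.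
import Mathlib
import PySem

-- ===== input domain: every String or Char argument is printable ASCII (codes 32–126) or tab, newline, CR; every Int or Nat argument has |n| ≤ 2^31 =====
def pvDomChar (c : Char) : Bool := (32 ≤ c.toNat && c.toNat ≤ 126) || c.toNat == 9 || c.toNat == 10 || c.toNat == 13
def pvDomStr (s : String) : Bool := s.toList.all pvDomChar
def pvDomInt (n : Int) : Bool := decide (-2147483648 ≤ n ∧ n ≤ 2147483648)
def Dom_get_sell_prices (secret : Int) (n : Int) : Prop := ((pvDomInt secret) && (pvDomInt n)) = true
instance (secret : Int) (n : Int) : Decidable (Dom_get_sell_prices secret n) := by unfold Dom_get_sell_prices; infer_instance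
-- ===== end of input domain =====

-- B replaces A's fused streaming loop (deque + dict) by a build-arrays-then-window-scan
-- decomposition; objective: alternative (same O(n) cost).

-- shared module helper get_next_secret (used by both Pythons)
def pvNextSecret (secret : Int) : Int :=
  let s1 := PySem.Int.bxor secret (PySem.Int.mod (secret * 64) 16777216)
  let s2 := PySem.Int.bxor s1 (PySem.Int.mod (PySem.Int.floordiv s1 32) 16777216)
  PySem.Int.bxor s2 (PySem.Int.mod (s2 * 2048) 16777216)

def pvFlatten (d : PySem.Dict (Int × Int × Int × Int) Int) : List (Int × Int × Int × Int × Int) :=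
  d.items.map (fun p => (p.1.1, p.1.2.1, p.1.2.2.1, p.1.2.2.2, p.2))

-- ===== PORT A =====
-- one step of A's loop body: state = (sell_prices, prev_secret, changes-deque)
def pvStepA (st : PySem.Dict (Int × Int × Int × Int) Int × Int × List Int) :
    PySem.Dict (Int × Int × Int × Int) Int × Int × List Int :=
  let d := st.1
  let prev := st.2.1
  let ch := st.2.2
  let curr := pvNextSecret prev
  let pc := PySem.Int.mod curr 10 - PySem.Int.mod prev 10
  -- deque(maxlen=4).append: drop the left element when full
  let ch' := (if ch.length == 4 then ch.drop 1 else ch) ++ [pc]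
  let d' :=
    if ch'.length == 4 then
      match ch' with
      | [a, b, c, e] =>
        if d.contains (a, b, c, e) then d else d.insert (a, b, c, e) (PySem.Int.mod curr 10)
      | _ => d
    else d
  (d', curr, ch')

def get_sell_prices (secret : Int) (n : Int) : List (Int × Int × Int × Int × Int) :=
  let st := (PySem.List.pyRange 0 n 1).foldl (fun st _ => pvStepA st)
    (PySem.Dict.empty, secret, ([] : List Int))
  pvFlatten st.1

-- ===== PORT B =====
def get_sell_prices_alt (secret : Int) (n : Int) : List (Int × Int × Int × Int × Int) :=
  -- Phase 1: build secrets, prices, changes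
  let bs := (PySem.List.pyRange 0 n 1).foldl
    (fun (st : List Int × Int) _ => (st.1 ++ [pvNextSecret st.2], pvNextSecret st.2))
    ([secret], secret)
  let prices := bs.1.map (fun x => PySem.Int.mod x 10)
  let changes := (PySem.List.pyRange 0 n 1).map
    (fun i => PySem.List.pyGetD prices (i + 1) 0 - PySem.List.pyGetD prices i 0)
  -- Phase 2: window scan
  let sell := (PySem.List.pyRange 0 (n - 3) 1).foldl
    (fun (d : PySem.Dict (Int × Int × Int × Int) Int) i =>
      let key := (PySem.List.pyGetD changes i 0, PySem.List.pyGetD changes (i + 1) 0,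
                  PySem.List.pyGetD changes (i + 2) 0, PySem.List.pyGetD changes (i + 3) 0)
      if d.contains key then d else d.insert key (PySem.List.pyGetD prices (i + 4) 0))
    PySem.Dict.empty
  pvFlatten sell

-- ===== PRECONDITION & SPEC =====
def Spec_get_sell_prices (secret : Int) (n : Int) (out : List (Int × Int × Int × Int × Int)) : Prop := out = get_sell_prices_alt secret n
instance (secret : Int) (n : Int) (out : List (Int × Int × Int × Int × Int)) : Decidable (Spec_get_sell_prices secret n out) := by unfold Spec_get_sell_prices; infer_instance

-- ===== CLAIM (what is proved, stated in full; the proofs are below) =====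
def Claim_equal_get_sell_prices : Prop := ∀ (secret : Int) (n : Int), Dom_get_sell_prices secret n → Spec_get_sell_prices secret n (get_sell_prices secret n)

-- ===== LEMMAS AND PROOFS =====

-- mathematical description of the computation, used by the proofs only
def pvS (secret : Int) : Nat → Int
  | 0 => secret
  | k + 1 => pvNextSecret (pvS secret k)

def pvP (secret : Int) (k : Nat) : Int := PySem.Int.mod (pvS secret k) 10

def pvC (secret : Int) (k : Nat) : Int := pvP secret (k + 1) - pvP secret k

def pvKey (secret : Int) (j : Nat) : Int × Int × Int × Int :=
  (pvC secret j, pvC secret (j + 1), pvC secret (j + 2), pvC secret (j + 3))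

def pvSpecStep (secret : Int) (d : PySem.Dict (Int × Int × Int × Int) Int) (j : Nat) :
    PySem.Dict (Int × Int × Int × Int) Int :=
  if d.contains (pvKey secret j) then d else d.insert (pvKey secret j) (pvP secret (j + 4))

def pvDictN (secret : Int) (m : Nat) : PySem.Dict (Int × Int × Int × Int) Int :=
  (List.range m).foldl (pvSpecStep secret) PySem.Dict.empty


theorem pvWindow (secret : Int) (m : Nat) (h : 3 ≤ m) :
    ((List.range (m+1)).map (pvC secret)).drop (m-3) =
      [pvC secret (m-3), pvC secret (m-2), pvC secret (m-1), pvC secret m] := by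
  apply List.ext_getElem
  · simp; omega
  · intro i h1 h2
    simp only [List.getElem_drop, List.getElem_map, List.getElem_range]
    simp at h2
    interval_cases i <;> simp <;> congr 1 <;> omega

theorem pvStepA_four (d : PySem.Dict (Int × Int × Int × Int) Int) (prev a b c e : Int) :
    pvStepA (d, prev, [a, b, c, e]) =
      ((if d.contains (b, c, e, PySem.Int.mod (pvNextSecret prev) 10 - PySem.Int.mod prev 10) then d
        else d.insert (b, c, e, PySem.Int.mod (pvNextSecret prev) 10 - PySem.Int.mod prev 10)
               (PySem.Int.mod (pvNextSecret prev) 10)),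
       pvNextSecret prev,
       [b, c, e, PySem.Int.mod (pvNextSecret prev) 10 - PySem.Int.mod prev 10]) := rfl

theorem pvDictN_succ (secret : Int) (k : Nat) :
    pvDictN secret (k + 1) = pvSpecStep secret (pvDictN secret k) k := by
  simp [pvDictN, List.range_succ]

theorem pvA_inv (secret : Int) (m : Nat) :
    (List.range m).foldl (fun st (_ : Nat) => pvStepA st) (PySem.Dict.empty, secret, ([] : List Int)) =
      (pvDictN secret (m - 3), pvS secret m, ((List.range m).map (pvC secret)).drop (m - 4)) := by
  induction m with
  | zero => simp [pvDictN, pvS]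
  | succ m ih =>
    rw [List.range_succ, List.foldl_append, ih]
    simp only [List.foldl_cons, List.foldl_nil]
    by_cases h4 : 4 ≤ m
    · have hw : ((List.range m).map (pvC secret)).drop (m - 4) =
          [pvC secret (m-4), pvC secret (m-3), pvC secret (m-2), pvC secret (m-1)] := by
        have := pvWindow secret (m-1) (by omega)
        have e1 : m - 1 + 1 = m := by omega
        have e2 : m - 1 - 3 = m - 4 := by omega
        rw [e1, e2] at this
        rw [this]
        congr 2
      rw [hw, pvStepA_four]
      have hpc : PySem.Int.mod (pvNextSecret (pvS secret m)) 10 - PySem.Int.mod (pvS secret m) 10 = pvC secret m := rfl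
      have hcur : PySem.Int.mod (pvNextSecret (pvS secret m)) 10 = pvP secret (m + 1) := rfl
      rw [hpc, hcur]
      have e1 : m - 3 + 1 = m - 2 := by omega
      have e2 : m - 3 + 2 = m - 1 := by omega
      have e3 : m - 3 + 3 = m := by omega
      have hkey : (pvC secret (m-3), pvC secret (m-2), pvC secret (m-1), pvC secret m) = pvKey secret (m-3) := by
        unfold pvKey; rw [e1, e2, e3]
      have hdict : pvDictN secret (m + 1 - 3) = pvSpecStep secret (pvDictN secret (m - 3)) (m - 3) := by
        have e : m + 1 - 3 = (m - 3) + 1 := by omega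
        rw [e, pvDictN_succ]
      have hval : pvP secret (m + 1) = pvP secret ((m - 3) + 4) := by congr 1; omega
      have hwin := pvWindow secret m (by omega)
      rw [List.range_succ] at hwin
      have e47 : m + 1 - 4 = m - 3 := by omega
      rw [e47, hwin, hkey, hval, hdict]
      simp [pvSpecStep, pvS]
    · interval_cases m <;>
        simp [pvStepA, pvDictN, pvSpecStep, pvKey, pvS, pvC, pvP, List.range_succ]

theorem pvA_eq (secret : Int) (n : Int) :
    get_sell_prices secret n = pvFlatten (pvDictN secret (n.toNat - 3)) := by
  unfold get_sell_prices
  rw [PySem.List.pyRange_one, List.foldl_map]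
  have e : (n - 0).toNat = n.toNat := by omega
  rw [e, pvA_inv]

theorem pvB_secrets (secret : Int) (m : Nat) :
    (List.range m).foldl
        (fun (st : List Int × Int) (_ : Nat) => (st.1 ++ [pvNextSecret st.2], pvNextSecret st.2))
        ([secret], secret) =
      ((List.range (m+1)).map (pvS secret), pvS secret m) := by
  induction m with
  | zero => simp [pvS]
  | succ m ih =>
    rw [List.range_succ, List.foldl_append, ih]
    simp only [List.foldl_cons, List.foldl_nil]
    rw [List.range_succ (n := m + 1), List.map_append]
    simp [pvS]

theorem pvB_eq (secret : Int) (n : Int) :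
    get_sell_prices_alt secret n = pvFlatten (pvDictN secret (n.toNat - 3)) := by
  unfold get_sell_prices_alt
  rw [PySem.List.pyRange_one, List.foldl_map]
  have e : (n - 0).toNat = n.toNat := by omega
  rw [e, pvB_secrets]
  set m := n.toNat with hm
  dsimp only
  have hprices : List.map (fun x => PySem.Int.mod x 10) (List.map (pvS secret) (List.range (m + 1))) =
      List.map (pvP secret) (List.range (m + 1)) := by
    rw [List.map_map]; rfl
  rw [hprices]
  have hch : List.map
      (fun i => PySem.List.pyGetD (List.map (pvP secret) (List.range (m + 1))) (i + 1) 0 -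
                PySem.List.pyGetD (List.map (pvP secret) (List.range (m + 1))) i 0)
      (List.map (fun (k : Nat) => 0 + (k : Int)) (List.range m)) = List.map (pvC secret) (List.range m) := by
    apply List.ext_getElem
    · simp
    · intro i h1 h2
      have hk' : i < m := by simpa using h2
      simp only [List.getElem_map, List.getElem_range]
      have c1 : (0 : Int) + (i : Int) + 1 = ((i + 1 : Nat) : Int) := by push_cast; ring
      have c0 : (0 : Int) + (i : Int) = ((i : Nat) : Int) := by ring
      rw [c1, c0, PySem.List.pyGetD_natCast, PySem.List.pyGetD_natCast,
          PySem.List.getD_map_range _ _ _ _ (by omega), PySem.List.getD_map_range _ _ _ _ (by omega)]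
      rfl
  rw [hch, PySem.List.pyRange_one, List.foldl_map]
  have e2 : (n - 3 - 0).toNat = m - 3 := by omega
  rw [e2]
  have hflat : ∀ d d', d = d' → pvFlatten d = pvFlatten d' := by intro d d' h; rw [h]
  apply hflat
  unfold pvDictN
  apply PySem.List.foldl_congr_mem
  intro d k hk
  have hk' : k < m - 3 := List.mem_range.mp hk
  have c0 : (0 : Int) + (k : Int) = ((k : Nat) : Int) := by ring
  have c1 : (k : Int) + 1 = ((k + 1 : Nat) : Int) := by push_cast; ring
  have c2 : (k : Int) + 2 = ((k + 2 : Nat) : Int) := by push_cast; ring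
  have c3 : (k : Int) + 3 = ((k + 3 : Nat) : Int) := by push_cast; ring
  have c4 : (k : Int) + 4 = ((k + 4 : Nat) : Int) := by push_cast; ring
  simp only [c0, c1, c2, c3, c4, PySem.List.pyGetD_natCast]
  rw [PySem.List.getD_map_range _ _ _ _ (by omega), PySem.List.getD_map_range _ _ _ _ (by omega),
      PySem.List.getD_map_range _ _ _ _ (by omega), PySem.List.getD_map_range _ _ _ _ (by omega),
      PySem.List.getD_map_range _ _ _ _ (by omega)]
  rfl

-- ===== VERDICT (by name: the statement is the Claim_ definition above) =====
theorem get_sell_prices_spec : Claim_equal_get_sell_prices := by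
  intro secret n _
  unfold Spec_get_sell_prices
  rw [pvA_eq, pvB_eq]
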